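-- pv_equiv track=rewrite | github.com/Erasimos/aoc | 2023/day_9.py | extrapolate_sequence_backwards
-- ===== SOURCE A (Python) =====
-- def extrapolate_sequence_backwards(layers):
--
--     bottom_layer = layers[-1]
--     new_bottom_layer = [0] + bottom_layer
--     new_layers = [new_bottom_layer]
--
--     for layer_index in reversed(range(len(layers) - 1)):
--
--         new_element = layers[layer_index][0] - new_layers[0][0]
--         new_layer = [new_element] + layers[layer_index]
--         new_layers = [new_layer] + new_layers
--
--     return new_layers
-- ===== SOURCE B (Python) =====
-- def extrapolate_sequence_backwards(layers):
--     # Forward two-pass via the alternating-sum closed form: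
--     # the new leading element of layer i equals sum_{j>=i} (-1)^(j-i) * layers[j][0]
--     # (over the non-bottom layers), so first compute the total alternating sum of
--     # the heads, then emit the rows left-to-right, peeling one signed head per step.
--     bottom = layers[-1]
--     total = 0
--     sign = 1
--     for layer in layers[:-1]:
--         total += sign * layer[0]
--         sign = -sign
--     out = []
--     sign = 1
--     rem = total
--     for layer in layers[:-1]:
--         out.append([sign * rem] + layer)
--         rem -= sign * layer[0]
--         sign = -sign
--     out.append([0] + bottom)
--     return out
-- ===== Notes on version B (the rewrite author's own statement) =====
-- stated objective: alternative
-- what changed: B replaces A's backward recurrence (prepending each new layer and reading the previous new element out of the growing output) with the alternating-sum closed form: one forward pass computes the total alternating sum of the layer heads, then a second forward pass emits the rows left-to-right, peeling one signed head per step.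
import Mathlib
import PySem

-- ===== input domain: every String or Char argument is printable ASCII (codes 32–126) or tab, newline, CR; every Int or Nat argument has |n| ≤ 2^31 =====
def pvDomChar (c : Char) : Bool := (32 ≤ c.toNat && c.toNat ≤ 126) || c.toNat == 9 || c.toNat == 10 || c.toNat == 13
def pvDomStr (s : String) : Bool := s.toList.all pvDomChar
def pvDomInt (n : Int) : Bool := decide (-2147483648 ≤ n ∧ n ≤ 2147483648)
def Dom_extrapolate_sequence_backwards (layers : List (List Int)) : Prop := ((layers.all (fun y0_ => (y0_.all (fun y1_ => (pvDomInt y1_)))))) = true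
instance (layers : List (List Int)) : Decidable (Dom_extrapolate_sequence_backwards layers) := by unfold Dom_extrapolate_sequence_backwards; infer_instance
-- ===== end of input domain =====

-- B replaces A's backward recurrence with a forward two-pass alternating-sum
-- closed form (total alternating head sum first, then rows left-to-right);
-- same cost, different algorithm. Neither implementation mutates its argument.


-- ===== PORT A =====
def extrapolate_sequence_backwards (layers : List (List Int)) : List (List Int) :=
  let bottom_layer := (PySem.List.pyGet? layers (-1)).getD []
  let new_bottom_layer := (0 : Int) :: bottom_layer
  (PySem.List.pyRange 0 ((layers.length : Int) - 1) 1).reverse.foldl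
    (fun new_layers layer_index =>
      let cur := (PySem.List.pyGet? layers layer_index).getD []
      let new_element := (PySem.List.pyGet? cur 0).getD 0
        - (PySem.List.pyGet? ((PySem.List.pyGet? new_layers 0).getD []) 0).getD 0
      (new_element :: cur) :: new_layers)
    [new_bottom_layer]

-- ===== PORT B =====
def extrapolate_sequence_backwards_alt (layers : List (List Int)) : List (List Int) :=
  let bottom := (PySem.List.pyGet? layers (-1)).getD []
  let ts := (PySem.List.slice layers none (some (-1))).foldl
      (fun (st : Int × Int) layer =>
        (st.1 + st.2 * (PySem.List.pyGet? layer 0).getD 0, -st.2))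
      ((0 : Int), (1 : Int))
  let total := ts.1
  let fin := (PySem.List.slice layers none (some (-1))).foldl
      (fun (st : List (List Int) × Int × Int) layer =>
        (st.1 ++ [(st.2.1 * st.2.2) :: layer],
         -st.2.1,
         st.2.2 - st.2.1 * (PySem.List.pyGet? layer 0).getD 0))
      ([], (1 : Int), total)
  fin.1 ++ [(0 : Int) :: bottom]

-- ===== PRECONDITION & SPEC =====
-- Pre_ excludes exactly the inputs where the Python A raises IndexError:
-- an empty layers list, and any non-last layer being empty (layers[i][0]).
def Pre_extrapolate_sequence_backwards (layers : List (List Int)) : Prop :=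
  layers ≠ [] ∧ ∀ l ∈ layers.dropLast, l ≠ []
instance (layers : List (List Int)) : Decidable (Pre_extrapolate_sequence_backwards layers) := by unfold Pre_extrapolate_sequence_backwards; infer_instance

def pvWitness_extrapolate_sequence_backwards : List (List Int) := [[10, 13, 16], [3, 3], [0]]

def Spec_extrapolate_sequence_backwards (layers : List (List Int)) (out : List (List Int)) : Prop := out = extrapolate_sequence_backwards_alt layers
instance (layers : List (List Int)) (out : List (List Int)) : Decidable (Spec_extrapolate_sequence_backwards layers out) := by unfold Spec_extrapolate_sequence_backwards; infer_instance

-- ===== CLAIM (what is proved, stated in full; the proofs are below) =====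
def Claim_equal_extrapolate_sequence_backwards : Prop := ∀ (layers : List (List Int)), Dom_extrapolate_sequence_backwards layers → Pre_extrapolate_sequence_backwards layers → Spec_extrapolate_sequence_backwards layers (extrapolate_sequence_backwards layers)

-- ===== LEMMAS AND PROOFS =====

-- head of a layer as both ports read it
def pvHd (l : List Int) : Int := (PySem.List.pyGet? l 0).getD 0
-- backward-extrapolated leading value of a stack of layers (alternating head sum)
def pvFv : List (List Int) → Int
  | [] => 0
  | l :: t => pvHd l - pvFv t
-- the list of new leading elements for the non-bottom layers
def pvFs : List (List Int) → List Int
  | [] => []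
  | l :: t => (pvHd l - pvFv t) :: pvFs t

def pvStepA (l : List Int) (acc : List (List Int)) : List (List Int) :=
  ((pvHd l - (PySem.List.pyGet? ((PySem.List.pyGet? acc 0).getD []) 0).getD 0) :: l) :: acc

theorem foldr_head (ls : List (List Int)) (b : List Int) :
    (PySem.List.pyGet? ((PySem.List.pyGet? (ls.foldr pvStepA [(0 : Int) :: b]) 0).getD []) 0).getD 0 = pvFv ls := by
  induction ls with
  | nil => simp [pvFv]
  | cons l t ih => simp [pvStepA, pvFv, ih]

theorem foldr_eq_zip (ls : List (List Int)) (b : List Int) :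
    ls.foldr pvStepA [(0 : Int) :: b]
      = ((pvFs ls).zip ls).map (fun p => p.1 :: p.2) ++ [(0 : Int) :: b] := by
  induction ls with
  | nil => simp [pvFs]
  | cons l t ih =>
    show pvStepA l (t.foldr pvStepA [(0:Int) :: b]) = _
    rw [pvStepA, foldr_head, ih]
    simp [pvFs]

theorem foldl_range_eq_foldr (layers : List (List Int)) (k : Nat) (hk : k ≤ layers.length)
    (init : List (List Int)) :
    (PySem.List.pyRange 0 (k : Int) 1).reverse.foldl
      (fun new_layers layer_index =>
        let cur := (PySem.List.pyGet? layers layer_index).getD []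
        let new_element := (PySem.List.pyGet? cur 0).getD 0
          - (PySem.List.pyGet? ((PySem.List.pyGet? new_layers 0).getD []) 0).getD 0
        (new_element :: cur) :: new_layers)
      init
    = (layers.take k).foldr pvStepA init := by
  induction k generalizing init with
  | zero => simp [PySem.List.pyRange_one_eq_nil]
  | succ k ih =>
    have h1 : ((k : Int) + 1) = ((k + 1 : Nat) : Int) := by push_cast; ring
    rw [← h1, PySem.List.pyRange_one_succ_right (a := 0) (b := (k : Int)) (by exact_mod_cast Nat.zero_le k)]
    have hk' : k < layers.length := by omega
    have htake : layers.take (k + 1) = layers.take k ++ [layers[k]] := by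
      rw [← List.take_concat_get (h := hk')]; exact List.concat_eq_append
    rw [htake, List.foldr_append, List.reverse_append]
    simp only [List.reverse_singleton, List.singleton_append, List.foldl_cons]
    rw [ih (by omega)]
    congr 1
    simp [pvStepA, pvHd, hk']

-- B's first pass computes the alternating head sum
theorem foldl_total (ls : List (List Int)) (t s : Int) :
    (ls.foldl (fun (st : Int × Int) layer =>
        (st.1 + st.2 * (PySem.List.pyGet? layer 0).getD 0, -st.2)) (t, s)).1
      = t + s * pvFv ls := by
  induction ls generalizing t s with
  | nil => simp [pvFv]
  | cons l rest ih =>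
    simp only [List.foldl_cons]
    rw [ih]
    simp [pvFv, pvHd]; ring

-- B's second pass emits exactly the zipped new layers, given sign/remainder invariant
theorem foldl_emit (ls : List (List Int)) (acc : List (List Int)) (s r : Int)
    (hs : s = 1 ∨ s = -1) (hr : s * r = pvFv ls) :
    (ls.foldl (fun (st : List (List Int) × Int × Int) layer =>
        (st.1 ++ [(st.2.1 * st.2.2) :: layer],
         -st.2.1,
         st.2.2 - st.2.1 * (PySem.List.pyGet? layer 0).getD 0)) (acc, s, r)).1
      = acc ++ ((pvFs ls).zip ls).map (fun p => p.1 :: p.2) := by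
  induction ls generalizing acc s r with
  | nil => simp [pvFs]
  | cons l t ih =>
    have hss : s * s = 1 := by rcases hs with h | h <;> simp [h]
    simp only [List.foldl_cons]
    rw [ih (acc ++ [(s * r) :: l]) (-s) (r - s * (PySem.List.pyGet? l 0).getD 0)
        (by rcases hs with h | h <;> simp [h])
        (by show -s * (r - s * pvHd l) = pvFv t
            have h2 : -s * (r - s * pvHd l) = -(s*r) + (s*s) * pvHd l := by ring
            have h3 : pvFv (l :: t) = pvHd l - pvFv t := rfl
            rw [h3] at hr
            rw [h2, hss, hr]; ring)]
    have hsr : s * r = pvHd l - pvFv t := hr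
    simp [pvFs, ← hsr]

-- ===== VERDICT (by name: the statement is the Claim_ definition above) =====
theorem extrapolate_sequence_backwards_spec : Claim_equal_extrapolate_sequence_backwards := by
  intro layers _ hpre
  obtain ⟨hne, -⟩ := hpre
  unfold Spec_extrapolate_sequence_backwards
  unfold extrapolate_sequence_backwards extrapolate_sequence_backwards_alt
  simp only [PySem.List.slice_to_neg_one]
  rw [foldl_total, foldl_emit layers.dropLast [] 1 (0 + 1 * pvFv layers.dropLast)
      (Or.inl rfl) (by ring)]
  have hlen : 1 ≤ layers.length := by
    cases layers with
    | nil => exact absurd rfl hne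
    | cons a t => simp
  have hcast : ((layers.length : Int) - 1) = ((layers.length - 1 : Nat) : Int) := by
    push_cast [hlen]; ring
  rw [hcast, foldl_range_eq_foldr layers (layers.length - 1) (by omega)]
  rw [← List.dropLast_eq_take]
  rw [PySem.List.pyGet?_neg_one]
  have hb : layers.getLast?.getD [] = layers.getLast hne := by
    rw [List.getLast?_eq_some_getLast hne]; rfl
  rw [hb, foldr_eq_zip]
  simp
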